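-- pv_equiv track=rewrite | github.com/flioink/PyProjects | Tkinter1/Exercise1.py | pick_peaks_gpt
-- ===== SOURCE A (Python) =====
-- def pick_peaks_gpt(arr):
--     peaks = {"pos": [], "peaks": []}
--     plateau_start = None  # Variable to track the start of a plateau
--
--     for i in range(1, len(arr)):
--         if arr[i] > arr[i - 1]:
--             plateau_start = i  # Start of a potential plateau
--         elif arr[i] < arr[i - 1] and plateau_start is not None:
--             peaks["pos"].append(plateau_start)
--             peaks["peaks"].append(arr[plateau_start])
--             plateau_start = None  # Reset the plateau start
--
--     return peaks
-- ===== SOURCE B (Python) =====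
-- def pick_peaks_gpt(arr):
--     # Compress arr into runs of equal values, then scan triples of runs for peaks.
--     runs = []
--     prev = None
--     for i, v in enumerate(arr):
--         if prev is None or prev != v:
--             runs.append((i, v))
--         prev = v
--     pos, peaks = [], []
--     for (_, a), (s, b), (_, c) in zip(runs, runs[1:], runs[2:]):
--         if a < b and b > c:
--             pos.append(s)
--             peaks.append(b)
--     return {"pos": pos, "peaks": peaks}
-- ===== Notes on version B (the rewrite author's own statement) =====
-- stated objective: alternative
-- what changed: B replaces A's single stateful scan (tracking a plateau_start flag over raw indices with arr[plateau_start] lookups) by a two-phase algorithm: compress the array into a run list of (start_index, value) pairs, then scan triples of adjacent runs for strict local maxima.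
import Mathlib
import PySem

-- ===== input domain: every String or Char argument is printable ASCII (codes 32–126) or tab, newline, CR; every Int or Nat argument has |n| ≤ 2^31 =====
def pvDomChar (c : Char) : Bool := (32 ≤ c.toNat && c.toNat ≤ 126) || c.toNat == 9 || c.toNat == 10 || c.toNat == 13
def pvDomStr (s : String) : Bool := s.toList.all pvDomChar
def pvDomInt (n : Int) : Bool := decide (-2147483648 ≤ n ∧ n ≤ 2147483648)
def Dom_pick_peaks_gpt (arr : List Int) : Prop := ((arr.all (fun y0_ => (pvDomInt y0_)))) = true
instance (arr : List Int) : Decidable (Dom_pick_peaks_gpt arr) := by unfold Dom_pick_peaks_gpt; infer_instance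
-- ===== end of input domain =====

-- B compresses the array into a run list and scans adjacent run triples, instead of A's single
-- stateful plateau_start scan; same O(n) cost, different decomposition.


-- ===== PORT A =====
-- A's loop 'for i in range(1, len(arr))' as structural recursion over the tail, carrying
-- prev = arr[i-1], the index i, plateau_start, and the dict's two lists; arr0 is the whole
-- array, kept for the literal lookup arr[plateau_start].
def pickPeaksLoopA (arr0 : List Int) (prev i : Int) (ps : Option Int)
    (pos pks : List Int) : List Int → List Int × List Int
  | [] => (pos, pks)
  | v :: rest =>
    if v > prev then pickPeaksLoopA arr0 v (i + 1) (some i) pos pks rest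
    else if v < prev then
      match ps with
      | some p =>
          pickPeaksLoopA arr0 v (i + 1) none (pos ++ [p])
            (pks ++ [(PySem.List.pyGet? arr0 p).getD 0]) rest
      | none => pickPeaksLoopA arr0 v (i + 1) none pos pks rest
    else pickPeaksLoopA arr0 v (i + 1) ps pos pks rest

def pick_peaks_gpt (arr : List Int) : List (String × List Int) :=
  match arr with
  | [] => [("pos", []), ("peaks", [])]
  | h :: t =>
    let r := pickPeaksLoopA arr h 1 none [] [] t
    [("pos", r.1), ("peaks", r.2)]

-- ===== PORT B =====
-- phase 1 of Source B: compress into runs of (first index, value)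
def pickPeaksRuns (prev : Option Int) (i : Int) : List Int → List (Int × Int)
  | [] => []
  | v :: rest =>
    if prev = some v then pickPeaksRuns (some v) (i + 1) rest
    else (i, v) :: pickPeaksRuns (some v) (i + 1) rest

-- phase 2 of Source B: the zip(runs, runs[1:], runs[2:]) triple scan
def pickPeaksScan : List (Int × Int) → List Int × List Int
  | r0 :: r1 :: r2 :: rest =>
    let tl := pickPeaksScan (r1 :: r2 :: rest)
    if r0.2 < r1.2 ∧ r1.2 > r2.2 then (r1.1 :: tl.1, r1.2 :: tl.2) else tl
  | _ => ([], [])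

def pick_peaks_gpt_alt (arr : List Int) : List (String × List Int) :=
  let r := pickPeaksScan (pickPeaksRuns none 0 arr)
  [("pos", r.1), ("peaks", r.2)]

-- ===== PRECONDITION & SPEC =====
def Spec_pick_peaks_gpt (arr : List Int) (out : List (String × List Int)) : Prop := out = pick_peaks_gpt_alt arr
instance (arr : List Int) (out : List (String × List Int)) : Decidable (Spec_pick_peaks_gpt arr out) := by unfold Spec_pick_peaks_gpt; infer_instance

-- ===== CLAIM (what is proved, stated in full; the proofs are below) =====
def Claim_equal_pick_peaks_gpt : Prop := ∀ (arr : List Int), Dom_pick_peaks_gpt arr → Spec_pick_peaks_gpt arr (pick_peaks_gpt arr)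

-- ===== LEMMAS AND PROOFS =====

-- Accumulator-free abstraction of A's loop: records (plateau index, prev) directly.
def specLoop (ps : Option Int) (prev i : Int) : List Int → List Int × List Int
  | [] => ([], [])
  | v :: rest =>
    if v > prev then specLoop (some i) v (i + 1) rest
    else if v < prev then
      match ps with
      | some p => let tl := specLoop none v (i + 1) rest; (p :: tl.1, prev :: tl.2)
      | none => specLoop none v (i + 1) rest
    else specLoop ps prev (i + 1) rest

-- A's loop equals specLoop (the lookup arr[plateau_start] returns prev under the invariant).
theorem loopA_eq_specLoop (rest : List Int) :
    ∀ (front : List Int) (prev : Int) (ps : Option Int) (pos pks : List Int)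
      (arr0 : List Int), arr0 = front ++ rest →
      (∀ p, ps = some p → PySem.List.pyGet? arr0 p = some prev) →
      pickPeaksLoopA arr0 prev (front.length : Int) ps pos pks rest =
        (pos ++ (specLoop ps prev (front.length : Int) rest).1,
         pks ++ (specLoop ps prev (front.length : Int) rest).2) := by
  induction rest with
  | nil => intro front prev ps pos pks arr0 _ _; simp [pickPeaksLoopA, specLoop]
  | cons v rest ih =>
    intro front prev ps pos pks arr0 harr hinv
    have hlen : ((front.length : Int) + 1) = (((front ++ [v]).length : Int)) := by
      simp
    have harr' : arr0 = (front ++ [v]) ++ rest := by simp [harr]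
    by_cases h1 : v > prev
    · have hget : PySem.List.pyGet? arr0 (front.length : Int) = some v := by
        rw [harr]; exact PySem.List.pyGet?_append_length front rest v
      simp only [pickPeaksLoopA, specLoop, if_pos h1, hlen]
      exact ih (front ++ [v]) v (some (front.length : Int)) pos pks arr0 harr'
        (by intro p hp; obtain rfl : ((front.length : Int)) = p := Option.some.inj hp; exact hget)
    · by_cases h2 : v < prev
      · cases ps with
        | some p =>
          have hp := hinv p rfl
          simp only [pickPeaksLoopA, specLoop, if_neg h1, if_pos h2, hp, Option.getD_some, hlen]
          rw [ih (front ++ [v]) v none (pos ++ [p])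
                (pks ++ [prev]) arr0 harr' (by intro q hq; cases hq)]
          simp
        | none =>
          simp only [pickPeaksLoopA, specLoop, if_neg h1, if_pos h2, hlen]
          exact ih (front ++ [v]) v none pos pks arr0 harr' (by intro q hq; cases hq)
      · have hv : v = prev := le_antisymm (not_lt.mp h1) (not_lt.mp h2)
        simp only [pickPeaksLoopA, specLoop, if_neg h1, if_neg h2, hlen]
        subst hv
        exact ih (front ++ [v]) v ps pos pks arr0 harr'
          (by intro p hp; exact hinv p hp)

-- dropping the head of the scan list when the middle run cannot be a peak
theorem pickPeaksScan_drop (x s : Int × Int) (RR : List (Int × Int)) (h : ¬ x.2 < s.2) :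
    pickPeaksScan (x :: s :: RR) = pickPeaksScan (s :: RR) := by
  cases RR with
  | nil => simp [pickPeaksScan]
  | cons r2 rr => simp only [pickPeaksScan]; rw [if_neg (by tauto)]

-- specLoop equals the triple scan over the run list, for both states of plateau_start
theorem specLoop_eq_scan (rest : List Int) :
    ∀ (prev i : Int),
      (∀ (p x q : Int), q < prev →
        specLoop (some p) prev i rest =
          pickPeaksScan ((x, q) :: (p, prev) :: pickPeaksRuns (some prev) i rest)) ∧
      (∀ (s : Int),
        specLoop none prev i rest =
          pickPeaksScan ((s, prev) :: pickPeaksRuns (some prev) i rest)) := by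
  induction rest with
  | nil =>
    intro prev i
    constructor
    · intro p x q _; simp [specLoop, pickPeaksRuns, pickPeaksScan]
    · intro s; simp [specLoop, pickPeaksRuns, pickPeaksScan]
  | cons v rest ih =>
    intro prev i
    by_cases h1 : v > prev
    · have hne : ¬ (some prev = some v) := by simp; omega
      constructor
      · intro p x q hq
        simp only [specLoop, pickPeaksRuns, if_pos h1, if_neg hne]
        rw [(ih v (i + 1)).1 i p prev h1]
        have : pickPeaksScan ((x, q) :: (p, prev) :: (i, v) :: pickPeaksRuns (some v) (i + 1) rest)
            = pickPeaksScan ((p, prev) :: (i, v) :: pickPeaksRuns (some v) (i + 1) rest) := by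
          simp only [pickPeaksScan]; rw [if_neg (by simp; omega)]
        rw [this]
      · intro s
        simp only [specLoop, pickPeaksRuns, if_pos h1, if_neg hne]
        exact (ih v (i + 1)).1 i s prev h1
    · by_cases h2 : v < prev
      · have hne : ¬ (some prev = some v) := by simp; omega
        have hdrop : ∀ y : Int × Int, y.2 = prev →
            pickPeaksScan (y :: (i, v) :: pickPeaksRuns (some v) (i + 1) rest)
              = pickPeaksScan ((i, v) :: pickPeaksRuns (some v) (i + 1) rest) := by
          intro y hy; exact pickPeaksScan_drop y (i, v) _ (by simp [hy]; omega)
        constructor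
        · intro p x q hq
          simp only [specLoop, pickPeaksRuns, if_neg h1, if_pos h2, if_neg hne, pickPeaksScan]
          rw [if_pos (by constructor <;> simpa)]
          rw [(ih v (i + 1)).2 i, hdrop (p, prev) rfl]
        · intro s
          simp only [specLoop, pickPeaksRuns, if_neg h1, if_pos h2, if_neg hne]
          rw [(ih v (i + 1)).2 i, hdrop (s, prev) rfl]
      · have hv : v = prev := le_antisymm (not_lt.mp h1) (not_lt.mp h2)
        subst hv
        constructor
        · intro p x q hq
          simp only [specLoop, pickPeaksRuns, if_neg h1]
          exact (ih v (i + 1)).1 p x q hq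
        · intro s
          simp only [specLoop, pickPeaksRuns, if_neg h1]
          exact (ih v (i + 1)).2 s

-- ===== VERDICT (by name: the statement is the Claim_ definition above) =====
theorem pick_peaks_gpt_spec : Claim_equal_pick_peaks_gpt := by
  intro arr _
  unfold Spec_pick_peaks_gpt
  cases arr with
  | nil => simp [pick_peaks_gpt, pick_peaks_gpt_alt, pickPeaksRuns, pickPeaksScan]
  | cons h t =>
    show _ = pick_peaks_gpt_alt (h :: t)
    have hA := loopA_eq_specLoop t [h] h none [] [] (h :: t) (by simp) (by intro p hp; cases hp)
    have hB := (specLoop_eq_scan t h 1).2 0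
    simp only [pick_peaks_gpt, pick_peaks_gpt_alt, pickPeaksRuns]
    norm_num at hA
    simp [hA, hB]
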